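-- pv_equiv track=rewrite | github.com/ZhongJing0121/LeetCode | LeetCode_2575/Solution_ZhongJing01.py | divisibilityArray
-- ===== SOURCE A (Python) =====
-- from typing import List
--
-- def divisibilityArray(word: str, m: int) -> List[int]:
--     n = len(word)
--     res = []
--     preNum = 0
--     for i in range(n):
--         preNum = (preNum * 10 + int(word[i])) % m
--         res.append(int(preNum == 0))
--     return res
-- ===== SOURCE B (Python) =====
-- from typing import List
--
-- def divisibilityArray(word: str, m: int) -> List[int]:
--     res = []
--     for i in range(len(word)):
--         val = 0
--         for ch in word[:i + 1]:
--             val = val * 10 + int(ch)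
--         res.append(1 if val % m == 0 else 0)
--     return res
-- ===== Notes on version B (the rewrite author's own statement) =====
-- stated objective: alternative
-- what changed: B recomputes each prefix's full integer value from scratch with an inner scan and tests divisibility directly, instead of A's single pass that carries a running remainder across iterations; it trades A's O(n) accumulator for a stateless per-index recomputation.
import Mathlib
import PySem

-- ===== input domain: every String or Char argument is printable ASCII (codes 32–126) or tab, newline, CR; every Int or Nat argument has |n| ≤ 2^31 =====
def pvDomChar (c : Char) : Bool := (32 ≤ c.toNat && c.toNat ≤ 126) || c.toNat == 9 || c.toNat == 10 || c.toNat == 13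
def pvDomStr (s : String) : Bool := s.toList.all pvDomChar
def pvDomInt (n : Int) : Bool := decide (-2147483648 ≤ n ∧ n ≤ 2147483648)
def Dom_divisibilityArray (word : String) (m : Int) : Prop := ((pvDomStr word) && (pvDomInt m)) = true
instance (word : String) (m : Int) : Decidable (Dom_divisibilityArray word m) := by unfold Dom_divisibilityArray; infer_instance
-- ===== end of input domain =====

-- B recomputes each prefix's integer value from scratch (inner scan per index) instead of A's running remainder; alternative decomposition, same return values.


-- int(c) for a single character c (exact where c is a decimal digit; elsewhere Python raises, excluded by Pre_)
def pvIntOfChar (c : Char) : Int := (PySem.Int.ofChars? [c]).getD 0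

-- ===== PORT A =====
def divisibilityArray (word : String) (m : Int) : List Int :=
  let n := PySem.Str.len word
  ((PySem.List.pyRange 0 n 1).foldl
    (fun (st : Int × List Int) i =>
      let p := PySem.Int.mod (st.1 * 10 + pvIntOfChar (PySem.List.pyGetD word.toList i 'x')) m
      (p, st.2 ++ [if p = 0 then (1 : Int) else 0]))
    ((0 : Int), ([] : List Int))).2

-- ===== PORT B =====
def divisibilityArray_alt (word : String) (m : Int) : List Int :=
  (PySem.List.pyRange 0 (PySem.Str.len word) 1).map (fun i =>
    let v := (PySem.List.slice word.toList (some 0) (some (i + 1))).foldl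
               (fun a c => a * 10 + pvIntOfChar c) 0
    if PySem.Int.mod v m = 0 then (1 : Int) else 0)

-- ===== PRECONDITION & SPEC =====
-- Pre_ excludes exactly the inputs where Python A raises: m = 0 (ZeroDivisionError) and any
-- non-digit character (int(word[i]) raises ValueError).
def Pre_divisibilityArray (word : String) (m : Int) : Prop :=
  m ≠ 0 ∧ word.toList.all (fun c => c.isDigit) = true
instance (word : String) (m : Int) : Decidable (Pre_divisibilityArray word m) := by
  unfold Pre_divisibilityArray; infer_instance
def pvWitness_divisibilityArray : String × Int := ("19", 2)

def Spec_divisibilityArray (word : String) (m : Int) (out : List Int) : Prop := out = divisibilityArray_alt word m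
instance (word : String) (m : Int) (out : List Int) : Decidable (Spec_divisibilityArray word m out) := by unfold Spec_divisibilityArray; infer_instance

-- ===== CLAIM (what is proved, stated in full; the proofs are below) =====
def Claim_equal_divisibilityArray : Prop := ∀ (word : String) (m : Int), Dom_divisibilityArray word m → Pre_divisibilityArray word m → Spec_divisibilityArray word m (divisibilityArray word m)

-- ===== LEMMAS AND PROOFS =====

lemma pvMod_eq_fmod (a b : Int) : PySem.Int.mod a b = Int.fmod a b := by
  simp [PySem.Int.mod, Int.fmod]

-- replacing the accumulator by its remainder mod m does not change the next remainder
lemma pvModStep (m v d : Int) :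
    PySem.Int.mod (PySem.Int.mod v m * 10 + d) m = PySem.Int.mod (v * 10 + d) m := by
  simp only [pvMod_eq_fmod]
  conv_rhs => rw [← Int.fmod_add_mul_fdiv v m]
  rw [show (Int.fmod v m + m * Int.fdiv v m) * 10 + d
        = Int.fmod v m * 10 + d + m * (Int.fdiv v m * 10) by ring,
      Int.add_mul_fmod_self_left]

-- the integer value of a digit list read after the (already read) value v
def pvVal (v : Int) (cs : List Char) : Int := cs.foldl (fun a c => a * 10 + pvIntOfChar c) v

-- A's loop, generalized: carried remainder = remainder of the prefix value
lemma pvLoopA (m : Int) (cs : List Char) (v : Int) (acc : List Int) :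
    (cs.foldl (fun (st : Int × List Int) c =>
        let p := PySem.Int.mod (st.1 * 10 + pvIntOfChar c) m
        (p, st.2 ++ [if p = 0 then (1 : Int) else 0])) (PySem.Int.mod v m, acc)).2
    = acc ++ (List.range cs.length).map
        (fun k => if PySem.Int.mod (pvVal v (cs.take (k + 1))) m = 0 then (1 : Int) else 0) := by
  induction cs generalizing v acc with
  | nil => simp
  | cons c cs ih =>
    simp only [List.foldl_cons, pvModStep]
    rw [ih (v * 10 + pvIntOfChar c)
        (acc ++ [if PySem.Int.mod (v * 10 + pvIntOfChar c) m = 0 then (1 : Int) else 0])]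
    simp only [List.length_cons, List.range_succ_eq_map, List.map_cons, List.map_map,
      List.append_assoc, List.singleton_append]
    refine congrArg (acc ++ ·) ?_
    refine congrArg₂ List.cons ?_ ?_
    · simp [pvVal]
    · exact List.map_congr_left
        (fun k _ => by simp [Function.comp, pvVal, List.take_succ_cons])

-- ===== VERDICT (by name: the statement is the Claim_ definition above) =====
theorem divisibilityArray_spec : Claim_equal_divisibilityArray := by
  intro word m _ _
  unfold Spec_divisibilityArray divisibilityArray divisibilityArray_alt
  simp only [PySem.Str.len_eq]
  rw [PySem.List.foldl_pyRange_zero_pyGetD' word.toList 'x'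
        (fun (st : Int × List Int) c =>
          let p := PySem.Int.mod (st.1 * 10 + pvIntOfChar c) m
          (p, st.2 ++ [if p = 0 then (1 : Int) else 0])) ((0 : Int), ([] : List Int))]
  rw [show ((0 : Int), ([] : List Int)) = (PySem.Int.mod 0 m, ([] : List Int)) by
        simp [pvMod_eq_fmod]]
  rw [pvLoopA m word.toList 0 []]
  rw [PySem.List.pyRange_one 0 ((word.toList.length : Nat) : Int), List.nil_append]
  simp only [Int.sub_zero, Int.toNat_natCast, List.map_map]
  refine List.map_congr_left (fun k _ => ?_)
  simp only [Function.comp, zero_add]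
  rw [show ((k : Int) + 1) = ((k + 1 : Nat) : Int) by push_cast; ring]
  rw [PySem.List.slice_toNat word.toList (by omega) (by omega)]
  simp [pvVal]
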